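-- pv_equiv track=rewrite | github.com/benj-edwards/apple2-mcp | src/apple2_mcp/screen.py | screen_address_to_coords
-- ===== SOURCE A (Python) =====
-- SCREEN_WIDTH = 40
--
-- SCREEN_LINE_ADDRESSES = [
--     0x0400,  # Line 0
--     0x0480,  # Line 1
--     0x0500,  # Line 2
--     0x0580,  # Line 3
--     0x0600,  # Line 4
--     0x0680,  # Line 5
--     0x0700,  # Line 6
--     0x0780,  # Line 7
--     0x0428,  # Line 8
--     0x04A8,  # Line 9
--     0x0528,  # Line 10
--     0x05A8,  # Line 11
--     0x0628,  # Line 12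
--     0x06A8,  # Line 13
--     0x0728,  # Line 14
--     0x07A8,  # Line 15
--     0x0450,  # Line 16
--     0x04D0,  # Line 17
--     0x0550,  # Line 18
--     0x05D0,  # Line 19
--     0x0650,  # Line 20
--     0x06D0,  # Line 21
--     0x0750,  # Line 22
--     0x07D0,  # Line 23
-- ]
--
-- def screen_address_to_coords(address: int) -> tuple[int, int] | None:
--     """Convert a memory address to screen coordinates.
--
--     Args:
--         address: Memory address ($0400-$07FF)
--
--     Returns:
--         (column, row) tuple, or None if address is in a "hole"
--     """
--     if not (0x0400 <= address <= 0x07FF):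
--         return None
--
--     for row, line_addr in enumerate(SCREEN_LINE_ADDRESSES):
--         if line_addr <= address < line_addr + SCREEN_WIDTH:
--             col = address - line_addr
--             return (col, row)
--
--     # Address is in a "hole" (unused bytes between lines)
--     return None
-- ===== SOURCE B (Python) =====
-- def screen_address_to_coords(address: int) -> tuple[int, int] | None:
--     """Arithmetic version: derive (col,row) from the address directly."""
--     if not (0x0400 <= address <= 0x07FF):
--         return None
--     offset = address - 0x0400
--     block = offset // 0x80
--     within = offset % 0x80
--     group = within // 0x28
--     if group == 3:
--         return None  # screen hole
--     return (within - group * 40, group * 8 + block)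
-- ===== Notes on version B (the rewrite author's own statement) =====
-- stated objective: simpler
-- what changed: Replaces the screen-line address table and its linear scan with direct base-8 interleave arithmetic (block/within/group) that computes (col,row) in constant time.
import Mathlib
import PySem

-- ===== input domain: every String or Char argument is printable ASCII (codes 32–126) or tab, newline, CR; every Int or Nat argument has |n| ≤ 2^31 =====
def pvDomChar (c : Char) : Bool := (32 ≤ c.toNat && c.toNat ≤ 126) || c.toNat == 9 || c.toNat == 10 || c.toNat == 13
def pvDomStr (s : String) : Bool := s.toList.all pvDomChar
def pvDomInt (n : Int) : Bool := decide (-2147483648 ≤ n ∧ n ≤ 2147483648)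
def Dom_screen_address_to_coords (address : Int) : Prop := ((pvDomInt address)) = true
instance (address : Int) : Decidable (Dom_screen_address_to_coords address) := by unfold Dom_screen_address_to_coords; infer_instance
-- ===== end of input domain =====

-- ===== PORT A =====
-- B derives (col,row) arithmetically instead of scanning A's 24-entry line-address table; same value everywhere.
def SCREEN_LINE_ADDRESSES : List Int :=
  [0x0400, 0x0480, 0x0500, 0x0580, 0x0600, 0x0680, 0x0700, 0x0780,
   0x0428, 0x04A8, 0x0528, 0x05A8, 0x0628, 0x06A8, 0x0728, 0x07A8,
   0x0450, 0x04D0, 0x0550, 0x05D0, 0x0650, 0x06D0, 0x0750, 0x07D0]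

-- the 'for row, line_addr in enumerate(...)' loop with its early return
def screenScanA (address : Int) : List (Int × Int) → Option (Int × Int)
  | [] => none
  | (row, line_addr) :: rest =>
      if line_addr ≤ address ∧ address < line_addr + 40 then
        some (address - line_addr, row)
      else screenScanA address rest

def screen_address_to_coords (address : Int) : Option (Int × Int) :=
  if ¬ (0x0400 ≤ address ∧ address ≤ 0x07FF) then none
  else screenScanA address (PySem.List.enumerate SCREEN_LINE_ADDRESSES)

-- ===== PORT B =====
def screen_address_to_coords_alt (address : Int) : Option (Int × Int) :=
  if 0x0400 ≤ address ∧ address ≤ 0x07FF then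
    let offset := address - 0x0400
    let block := PySem.Int.floordiv offset 0x80
    let within := PySem.Int.mod offset 0x80
    let group := PySem.Int.floordiv within 0x28
    if group = 3 then none
    else some (within - group * 40, group * 8 + block)
  else none

-- ===== PRECONDITION & SPEC =====
def Spec_screen_address_to_coords (address : Int) (out : Option (Int × Int)) : Prop := out = screen_address_to_coords_alt address
instance (address : Int) (out : Option (Int × Int)) : Decidable (Spec_screen_address_to_coords address out) := by unfold Spec_screen_address_to_coords; infer_instance

-- ===== CLAIM (what is proved, stated in full; the proofs are below) =====
def Claim_equal_screen_address_to_coords : Prop := ∀ (address : Int), Dom_screen_address_to_coords address → Spec_screen_address_to_coords address (screen_address_to_coords address)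

-- ===== LEMMAS AND PROOFS =====

-- ===== VERDICT (by name: the statement is the Claim_ definition above) =====
-- the two ports agree on every in-range address (kernel check over all 1024)
set_option maxRecDepth 4096 in
theorem agree_in_range : ∀ n : Nat, n < 1024 → screen_address_to_coords (1024 + (n : Int)) = screen_address_to_coords_alt (1024 + (n : Int)) := by decide

theorem screen_address_to_coords_spec : Claim_equal_screen_address_to_coords := by
  intro address _
  unfold Spec_screen_address_to_coords
  by_cases h : 0x0400 ≤ address ∧ address ≤ 0x07FF
  · have hn : address = 1024 + ((address - 1024).toNat : Int) := by omega
    have hb : (address - 1024).toNat < 1024 := by omega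
    rw [hn]
    exact agree_in_range _ hb
  · simp only [screen_address_to_coords, screen_address_to_coords_alt, if_neg h, if_pos h]
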